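-- pv_equiv track=rewrite | github.com/malcolmsimgithub/ChemOS2.0 | ChemOS2.0-simulation-errors/sila-optics/optical_characterization/old_files/20210211/transient_emission.py | _transpose_list
-- ===== SOURCE A (Python) =====
-- def _transpose_list(l):
--
--     max_dnum = max([len(row) for row in l])
--
--     t_list = []
--     for i in range(max_dnum):
--         t_list.append([])
--         for row in l:
--             if i <= len(row) -1:
--                 t_list[i].append(row[i])
--             else: t_list[i].append(None)
--
--     return t_list
-- ===== SOURCE B (Python) =====
-- def _transpose_list(l):
--     max_dnum = max([len(row) for row in l])
--     padded = [list(row) + [None] * (max_dnum - len(row)) for row in l]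
--     return [list(col) for col in zip(*padded)]
-- ===== Notes on version B (the rewrite author's own statement) =====
-- stated objective: simpler
-- what changed: Replaces A's per-cell index-guarded double loop with a pad-then-transpose decomposition: each row is padded with None to the max length, then the rectangular matrix is transposed via zip(*padded).
-- outside the precondition, e.g. on _transpose_list([]): A raises ValueError, B raises ValueError
import Mathlib
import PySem

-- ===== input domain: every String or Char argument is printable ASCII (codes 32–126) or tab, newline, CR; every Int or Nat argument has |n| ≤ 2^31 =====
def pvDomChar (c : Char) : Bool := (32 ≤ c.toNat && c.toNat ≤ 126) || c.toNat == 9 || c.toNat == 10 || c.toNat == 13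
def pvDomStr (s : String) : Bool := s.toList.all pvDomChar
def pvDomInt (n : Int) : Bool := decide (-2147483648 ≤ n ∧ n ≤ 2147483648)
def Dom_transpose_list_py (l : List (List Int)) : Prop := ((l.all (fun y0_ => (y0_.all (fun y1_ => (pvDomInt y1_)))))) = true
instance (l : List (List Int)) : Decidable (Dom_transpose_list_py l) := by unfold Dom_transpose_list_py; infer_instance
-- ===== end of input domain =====

-- B decomposes the task into pad-then-transpose (zip) instead of A's per-cell index-guarded double loop.

-- ===== PORT A =====
def transpose_list_py (l : List (List Int)) : List (List (Option Int)) :=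
  let max_dnum := (PySem.List.max? (l.map (fun row => (row.length : Int))) (fun x => x)).getD 0
  (PySem.List.pyRange 0 max_dnum 1).foldl (fun t_list i =>
    t_list ++ [l.foldl (fun cur row =>
      cur ++ [if i ≤ (row.length : Int) - 1 then PySem.List.pyGet? row i else none]) []]) []

-- ===== PORT B =====
-- port of Python's zip(*rows): take heads while every row is nonempty
def pyZipStar {α : Type} [Inhabited α] : List (List α) → List (List α)
  | [] => []
  | r :: rs =>
    if ((r :: rs).all (fun x => !x.isEmpty)) = true then
      (r :: rs).map (fun x => x.headI) :: pyZipStar ((r :: rs).map (fun x => x.tail))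
    else []
termination_by rows => (rows.headD []).length
decreasing_by
  cases r with
  | nil => simp_all
  | cons a t => simp

def transpose_list_py_alt (l : List (List Int)) : List (List (Option Int)) :=
  let max_dnum := (PySem.List.max? (l.map (fun row => (row.length : Int))) (fun x => x)).getD 0
  let padded := l.map (fun row =>
    row.map some ++ List.replicate (max_dnum - (row.length : Int)).toNat (none : Option Int))
  pyZipStar padded

-- ===== PRECONDITION & SPEC =====
-- Pre_ excludes only l = [], on which Python A raises ValueError (max of empty sequence).
def Pre_transpose_list_py (l : List (List Int)) : Prop := l ≠ []
instance (l : List (List Int)) : Decidable (Pre_transpose_list_py l) := by unfold Pre_transpose_list_py; infer_instance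
def pvWitness_transpose_list_py : List (List Int) := [[1], [2, 3]]

def Spec_transpose_list_py (l : List (List Int)) (out : List (List (Option Int))) : Prop := out = transpose_list_py_alt l
instance (l : List (List Int)) (out : List (List (Option Int))) : Decidable (Spec_transpose_list_py l out) := by unfold Spec_transpose_list_py; infer_instance

-- ===== CLAIM (what is proved, stated in full; the proofs are below) =====
def Claim_equal_transpose_list_py : Prop := ∀ (l : List (List Int)), Dom_transpose_list_py l → Pre_transpose_list_py l → Spec_transpose_list_py l (transpose_list_py l)

-- ===== LEMMAS AND PROOFS =====

-- A in closed form: column k lists, for each row, row[k] if present else none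
lemma portA_normal (l : List (List Int)) :
    transpose_list_py l =
      (List.range ((PySem.List.max? (l.map (fun row => (row.length : Int))) (fun x => x)).getD 0).toNat).map
        (fun (k : Nat) => l.map (fun row => if (k : Int) ≤ (row.length : Int) - 1 then PySem.List.pyGet? row (k : Int) else none)) := by
  unfold transpose_list_py
  simp only [PySem.List.pyRange_one, PySem.List.foldl_append_singleton_eq_map, List.map_map,
    List.nil_append, Int.sub_zero]
  refine List.map_congr_left fun k hk => ?_
  simp

-- zip(*rows) on a nonempty rectangular matrix of height n
lemma pyZipStar_rect (n : Nat) :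
    ∀ (rows : List (List (Option Int))), rows ≠ [] → (∀ r ∈ rows, r.length = n) →
      pyZipStar rows = (List.range n).map (fun k => rows.map (fun r => r.getD k none)) := by
  induction n with
  | zero =>
    intro rows hne hlen
    match rows with
    | r :: rs =>
      have hr : r = [] := List.length_eq_zero_iff.mp (hlen r (by simp))
      unfold pyZipStar
      simp [hr]
  | succ n ih =>
    intro rows hne hlen
    match rows with
    | r :: rs =>
      have hall : ((r :: rs).all (fun x => !x.isEmpty)) = true := by
        simp only [List.all_eq_true]
        intro x hx
        have := hlen x hx
        cases x with
        | nil => simp at this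
        | cons a t => simp
      unfold pyZipStar
      rw [if_pos hall]
      rw [ih ((r :: rs).map (fun x => x.tail)) (by simp) (by
        intro t ht
        obtain ⟨x, hx, rfl⟩ := List.mem_map.mp ht
        have := hlen x hx
        simp [List.length_tail, this])]
      rw [List.range_succ_eq_map]
      simp only [List.map_map, Function.comp_def]
      refine List.cons_eq_cons.mpr ⟨?_, ?_⟩
      · apply List.map_congr_left; intro x hx
        have hx' := hlen x hx
        cases x with
        | nil => simp at hx'
        | cons a t => simp [List.headI]
      · rw [List.map_map]
        apply List.map_congr_left; intro k hk
        apply List.map_congr_left; intro x hx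
        cases x <;> simp

-- ===== VERDICT (by name: the statement is the Claim_ definition above) =====
theorem transpose_list_py_spec : Claim_equal_transpose_list_py := by
  intro l _ hne
  unfold Spec_transpose_list_py transpose_list_py_alt
  rw [portA_normal]
  set m := (PySem.List.max? (l.map (fun row => (row.length : Int))) (fun x => x)).getD 0 with hm
  obtain ⟨x, hx⟩ : ∃ x, PySem.List.max? (l.map (fun row => (row.length : Int))) (fun x => x) = some x := by
    cases h : PySem.List.max? (l.map (fun row => (row.length : Int))) (fun x => x) with
    | none =>
      rw [PySem.List.max?_eq_none_iff] at h
      exact absurd (by simpa using h) hne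
    | some x => exact ⟨x, rfl⟩
  have hmx : m = x := by rw [hm, hx]; rfl
  have hmax : ∀ row ∈ l, (row.length : Int) ≤ m := by
    intro row hrow
    have := PySem.List.max?_isMax hx (row.length : Int) (List.mem_map_of_mem hrow)
    simpa [hmx] using this
  have hlen : ∀ r ∈ l.map (fun row =>
      row.map some ++ List.replicate (m - (row.length : Int)).toNat (none : Option Int)),
      r.length = m.toNat := by
    intro r hr
    obtain ⟨row, hrow, rfl⟩ := List.mem_map.mp hr
    have h1 := hmax row hrow
    simp only [List.length_append, List.length_map, List.length_replicate]
    omega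
  rw [pyZipStar_rect m.toNat _ (by simpa using hne) hlen]
  apply List.map_congr_left
  intro k hk
  rw [List.map_map]
  apply List.map_congr_left
  intro row hrow
  simp only [Function.comp_def]
  by_cases hkr : (k : Int) ≤ (row.length : Int) - 1
  · have hklt : k < row.length := by omega
    rw [if_pos hkr]
    rw [PySem.List.pyGet?_natCast]
    rw [List.getD_append _ _ _ _ (by simpa using hklt)]
    simp [List.getD, hklt]
  · have hkge : row.length ≤ k := by omega
    rw [if_neg hkr]
    rw [List.getD_append_right _ _ _ _ (by simpa using hkge)]
    simp [List.getD]
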